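-- pv_equiv track=rewrite | github.com/Chris-Perkins/CodeForces-Solutions | Programs/550B - Preparing Olympiad/550b.py | b_f
-- ===== SOURCE A (Python) =====
-- def b_f(l_v, c_v, c_i, l, h, l_p, h_p, x):
--     if c_i == len(l_v):
--         return 0
--     else:
--         n_l = l_v[c_i] if not l_p else min(l_v[c_i], l_p)
--         n_h = l_v[c_i] if not l_p else max(l_v[c_i], h_p)
--
--         return (1 if c_v + l_v[c_i] >= l and
--                      c_v + l_v[c_i] <= h  and
--                      n_h - n_l >= x else 0) + (
--                      b_f(l_v, c_v, c_i + 1, l, h, l_p, h_p, x) +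
--                      b_f(l_v, c_v + l_v[c_i], c_i + 1, l, h, n_l, n_h, x))
-- ===== SOURCE B (Python) =====
-- def b_f(l_v, c_v, c_i, l, h, l_p, h_p, x):
--     # Iterative DP: one dict of partial-subset states (sum, lo, hi) -> count,
--     # instead of A's binary recursion over every individual subset.
--     states = {(c_v, l_p, h_p): 1}
--     total = 0
--     for i in range(c_i, len(l_v)):
--         v = l_v[i]
--         new = {}
--         for (s, lo, hi), cnt in states.items():
--             nl = v if not lo else min(v, lo)
--             nh = v if not lo else max(v, hi)
--             if l <= s + v <= h and nh - nl >= x: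
--                 total += cnt
--             k = (s + v, nl, nh)
--             new[k] = new.get(k, 0) + cnt
--         for k, c in new.items():
--             states[k] = states.get(k, 0) + c
--     return total
-- ===== Notes on version B (the rewrite author's own statement) =====
-- stated objective: alternative
-- what changed: Replaces A's binary recursion that visits every subset individually by one left-to-right pass that keeps a dict mapping each distinct partial-subset state (sum, lo, hi) to its multiplicity, merging equal states so duplicate-heavy inputs collapse exponentially many subsets into few states.
import Mathlib
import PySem

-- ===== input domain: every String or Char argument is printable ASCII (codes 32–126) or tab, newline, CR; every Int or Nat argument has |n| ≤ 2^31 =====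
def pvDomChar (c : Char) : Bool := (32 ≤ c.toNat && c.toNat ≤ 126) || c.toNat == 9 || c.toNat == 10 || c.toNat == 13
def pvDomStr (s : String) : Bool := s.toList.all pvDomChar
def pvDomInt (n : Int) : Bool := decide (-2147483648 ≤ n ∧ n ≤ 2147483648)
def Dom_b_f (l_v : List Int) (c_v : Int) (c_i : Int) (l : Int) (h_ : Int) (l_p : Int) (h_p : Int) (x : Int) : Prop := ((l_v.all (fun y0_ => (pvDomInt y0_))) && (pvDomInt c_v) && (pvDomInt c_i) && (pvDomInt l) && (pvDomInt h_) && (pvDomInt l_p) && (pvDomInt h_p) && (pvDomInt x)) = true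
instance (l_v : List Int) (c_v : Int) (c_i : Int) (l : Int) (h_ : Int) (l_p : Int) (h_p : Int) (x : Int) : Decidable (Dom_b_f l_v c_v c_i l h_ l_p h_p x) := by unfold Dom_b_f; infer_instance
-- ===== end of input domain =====

-- B replaces A's binary recursion over every individual subset by one left-to-right pass
-- keeping a dict of partial-subset states (sum, lo, hi) -> count (objective: alternative).

-- ===== PORT A =====
-- fuel makes the recursion total; under Pre_b_f (c_i ≤ len(l_v)) the fuel is never exhausted
def b_f_go (l_v : List Int) (l : Int) (h_ : Int) (x : Int) :
    Nat → Int → Int → Int → Int → Int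
  | 0, _, _, _, _ => 0
  | fuel+1, c_v, c_i, l_p, h_p =>
    if c_i = (l_v.length : Int) then 0
    else
      let v := PySem.List.pyGetD l_v c_i 0
      let n_l := if l_p = 0 then v else min v l_p
      let n_h := if l_p = 0 then v else max v h_p
      (if l ≤ c_v + v ∧ c_v + v ≤ h_ ∧ x ≤ n_h - n_l then 1 else 0) +
        (b_f_go l_v l h_ x fuel c_v (c_i + 1) l_p h_p +
         b_f_go l_v l h_ x fuel (c_v + v) (c_i + 1) n_l n_h)

def b_f (l_v : List Int) (c_v : Int) (c_i : Int) (l : Int) (h_ : Int) (l_p : Int) (h_p : Int) (x : Int) : Int :=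
  b_f_go l_v l h_ x (((l_v.length : Int) - c_i).toNat + 1) c_v c_i l_p h_p

-- ===== PORT B =====
-- loop body of B's pass over the indices (a dict of states (sum, lo, hi) -> count, plus the running total)
def altStep (l_v : List Int) (l : Int) (h_ : Int) (x : Int)
    (st : PySem.Dict (Int × Int × Int) Int × Int) (i : Int) :
    PySem.Dict (Int × Int × Int) Int × Int :=
  let v := PySem.List.pyGetD l_v i 0
  let inner :=
    st.1.items.foldl
      (fun (acc : PySem.Dict (Int × Int × Int) Int × Int) p =>
        let s := p.1.1
        let lo := p.1.2.1
        let hi := p.1.2.2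
        let cnt := p.2
        let nl := if lo = 0 then v else min v lo
        let nh := if lo = 0 then v else max v hi
        let t' := if l ≤ s + v ∧ s + v ≤ h_ ∧ x ≤ nh - nl then acc.2 + cnt else acc.2
        let k := (s + v, nl, nh)
        (acc.1.insert k (acc.1.getD k 0 + cnt), t'))
      (PySem.Dict.empty, st.2)
  let states' :=
    inner.1.items.foldl (fun d p => d.insert p.1 (d.getD p.1 0 + p.2)) st.1
  (states', inner.2)

def b_f_alt (l_v : List Int) (c_v : Int) (c_i : Int) (l : Int) (h_ : Int) (l_p : Int) (h_p : Int) (x : Int) : Int :=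
  let init : PySem.Dict (Int × Int × Int) Int := PySem.Dict.ofList [((c_v, l_p, h_p), 1)]
  ((PySem.List.pyRange c_i (l_v.length : Int) 1).foldl (altStep l_v l h_ x) (init, 0)).2

-- ===== PRECONDITION & SPEC =====
-- Pre_ excludes exactly the inputs where Python A raises IndexError: c_i > len(l_v)
-- (first recursive index check never hits len) or c_i < -len(l_v) (negative indexing out of range).
def Pre_b_f (l_v : List Int) (c_v : Int) (c_i : Int) (l : Int) (h_ : Int) (l_p : Int) (h_p : Int) (x : Int) : Prop :=
  -(l_v.length : Int) ≤ c_i ∧ c_i ≤ (l_v.length : Int)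
instance (l_v : List Int) (c_v : Int) (c_i : Int) (l : Int) (h_ : Int) (l_p : Int) (h_p : Int) (x : Int) : Decidable (Pre_b_f l_v c_v c_i l h_ l_p h_p x) := by unfold Pre_b_f; infer_instance

def pvWitness_b_f : List Int × Int × Int × Int × Int × Int × Int × Int := ([1, 2, 3], 0, 0, 2, 5, 0, 0, 1)

def Spec_b_f (l_v : List Int) (c_v : Int) (c_i : Int) (l : Int) (h_ : Int) (l_p : Int) (h_p : Int) (x : Int) (out : Int) : Prop := out = b_f_alt l_v c_v c_i l h_ l_p h_p x
instance (l_v : List Int) (c_v : Int) (c_i : Int) (l : Int) (h_ : Int) (l_p : Int) (h_p : Int) (x : Int) (out : Int) : Decidable (Spec_b_f l_v c_v c_i l h_ l_p h_p x out) := by unfold Spec_b_f; infer_instance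

-- ===== CLAIM (what is proved, stated in full; the proofs are below) =====
def Claim_equal_b_f : Prop := ∀ (l_v : List Int) (c_v : Int) (c_i : Int) (l : Int) (h_ : Int) (l_p : Int) (h_p : Int) (x : Int), Dom_b_f l_v c_v c_i l h_ l_p h_p x → Pre_b_f l_v c_v c_i l h_ l_p h_p x → Spec_b_f l_v c_v c_i l h_ l_p h_p x (b_f l_v c_v c_i l h_ l_p h_p x)
-- ===== LEMMAS AND PROOFS =====

-- model: structural recursion of A over the list of accessed elements
def modelG (l : Int) (h_ : Int) (x : Int) : List Int → Int × Int × Int → Int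
  | [], _ => 0
  | v :: es, (s, lo, hi) =>
    let nl := if lo = 0 then v else min v lo
    let nh := if lo = 0 then v else max v hi
    (if l ≤ s + v ∧ s + v ≤ h_ ∧ x ≤ nh - nl then 1 else 0) +
      (modelG l h_ x es (s, lo, hi) + modelG l h_ x es (s + v, nl, nh))

def wsum (F : Int × Int × Int → Int) (d : PySem.Dict (Int × Int × Int) Int) : Int :=
  (d.items.map (fun p => p.2 * F p.1)).sum

-- weighted sum of a dict of states
lemma wsumList_update (F : Int × Int × Int → Int) (c : Int) :
    ∀ (ls : List ((Int × Int × Int) × Int)) (k : Int × Int × Int) (v0 : Int),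
      (ls.map Prod.fst).Nodup → (k, v0) ∈ ls →
      ((ls.map (fun p => if (p.1 == k) = true then (k, v0 + c) else p)).map
          (fun p => p.2 * F p.1)).sum
        = (ls.map (fun p => p.2 * F p.1)).sum + c * F k := by
  intro ls
  induction ls with
  | nil => intro k v0 _ h; simp at h
  | cons p t ih =>
    intro k v0 hnd hmem
    simp only [List.map_cons, List.nodup_cons, List.sum_cons] at hnd ⊢
    rcases List.mem_cons.mp hmem with hp | ht
    · subst hp
      have ht : t.map (fun p => if (p.1 == (k, v0).1) = true then ((k, v0).1, v0 + c) else p) = t := by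
        conv_rhs => rw [← List.map_id t]
        apply List.map_congr_left
        intro q hq
        have hne : q.1 ≠ (k, v0).1 := by
          intro he; exact hnd.1 (he ▸ List.mem_map_of_mem hq)
        simp [hne]
      rw [ht, if_pos (by simp : (((k, v0).1 == k) = true))]
      dsimp only
      ring
    · have hpk : (p.1 == k) = false := by
        refine beq_false_of_ne ?_
        intro he
        apply hnd.1
        rw [he]
        exact List.mem_map_of_mem (f := Prod.fst) ht
      rw [if_neg (by simp [hpk])]
      rw [ih k v0 hnd.2 ht]; ring

lemma wsum_insert_add (F : Int × Int × Int → Int)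
    (d : PySem.Dict (Int × Int × Int) Int) (hd : d.keys.Nodup) (k : Int × Int × Int) (c : Int) :
    wsum F (d.insert k (d.getD k 0 + c)) = wsum F d + c * F k := by
  by_cases hc : d.contains k = true
  · have hk : k ∈ d.keys := (PySem.Dict.contains_iff_mem_keys d k).mp hc
    have : ∃ v0, (k, v0) ∈ d.items := by
      rcases List.mem_map.mp hk with ⟨q, hq, hfst⟩
      exact ⟨q.2, by rwa [show (k, q.2) = q from Prod.ext hfst.symm rfl]⟩
    rcases this with ⟨v0, hv0⟩
    have hg : d.getD k 0 = v0 := PySem.Dict.getD_of_mem_items d hv0 hd 0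
    unfold wsum
    rw [PySem.Dict.items_insert_of_contains d _ hc, hg]
    exact wsumList_update F c d.items k v0 hd hv0
  · have hc' : d.contains k = false := by simpa using hc
    unfold wsum
    rw [PySem.Dict.items_insert_of_not_contains d _ hc',
        PySem.Dict.getD_of_not_contains d 0 hc']
    simp

lemma wsum_foldl_insert_key {α : Type} (F : Int × Int × Int → Int)
    (nk : α → Int × Int × Int) (w : α → Int) :
    ∀ (ps : List α) (d : PySem.Dict (Int × Int × Int) Int), d.keys.Nodup →
      wsum F (ps.foldl (fun d p => d.insert (nk p) (d.getD (nk p) 0 + w p)) d)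
        = wsum F d + (ps.map (fun p => w p * F (nk p))).sum := by
  intro ps
  induction ps with
  | nil => intro d _; simp
  | cons p t ih =>
    intro d hd
    simp only [List.foldl_cons, List.map_cons, List.sum_cons]
    rw [ih _ (PySem.Dict.nodup_keys_insert d _ _ hd), wsum_insert_add F d hd]
    ring

lemma nodup_foldl_insert_key {α : Type} (nk : α → Int × Int × Int) (w : α → Int)
    (ps : List α) (d : PySem.Dict (Int × Int × Int) Int) (hd : d.keys.Nodup) :
    (ps.foldl (fun d p => d.insert (nk p) (d.getD (nk p) 0 + w p)) d).keys.Nodup :=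
  PySem.Dict.nodup_keys_foldl_insert_key ps nk (fun d p => d.getD (nk p) 0 + w p) d hd

-- the inner loop of B: dict accumulation and total, tracked together
lemma foldl_pair {α : Type} (nk : α → Int × Int × Int) (w : α → Int)
    (cond : α → Prop) [DecidablePred cond] :
    ∀ (ps : List α) (d0 : PySem.Dict (Int × Int × Int) Int) (t0 : Int),
      ps.foldl (fun acc p => (acc.1.insert (nk p) (acc.1.getD (nk p) 0 + w p),
          if cond p then acc.2 + w p else acc.2)) (d0, t0)
        = (ps.foldl (fun d p => d.insert (nk p) (d.getD (nk p) 0 + w p)) d0,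
           t0 + (ps.map (fun p => if cond p then w p else 0)).sum) := by
  intro ps
  induction ps with
  | nil => intro d0 t0; simp
  | cons p t ih =>
    intro d0 t0
    simp only [List.foldl_cons, List.map_cons, List.sum_cons]
    rw [ih]
    congr 1
    by_cases h : cond p
    · simp [h, add_assoc]
    · simp [h]

lemma altStep_eq (l_v : List Int) (l h_ x : Int)
    (d : PySem.Dict (Int × Int × Int) Int) (t i : Int) :
    altStep l_v l h_ x (d, t) i =
      ((d.items.foldl
          (fun dd (p : (Int × Int × Int) × Int) => dd.insert
            (p.1.1 + PySem.List.pyGetD l_v i 0,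
             if p.1.2.1 = 0 then PySem.List.pyGetD l_v i 0 else min (PySem.List.pyGetD l_v i 0) p.1.2.1,
             if p.1.2.1 = 0 then PySem.List.pyGetD l_v i 0 else max (PySem.List.pyGetD l_v i 0) p.1.2.2)
            (dd.getD
              (p.1.1 + PySem.List.pyGetD l_v i 0,
               if p.1.2.1 = 0 then PySem.List.pyGetD l_v i 0 else min (PySem.List.pyGetD l_v i 0) p.1.2.1,
               if p.1.2.1 = 0 then PySem.List.pyGetD l_v i 0 else max (PySem.List.pyGetD l_v i 0) p.1.2.2) 0 + p.2))
          PySem.Dict.empty).items.foldl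
        (fun dd (p : (Int × Int × Int) × Int) => dd.insert p.1 (dd.getD p.1 0 + p.2)) d,
       t + (d.items.map
          (fun p => if l ≤ p.1.1 + PySem.List.pyGetD l_v i 0 ∧ p.1.1 + PySem.List.pyGetD l_v i 0 ≤ h_ ∧
              x ≤ (if p.1.2.1 = 0 then PySem.List.pyGetD l_v i 0 else max (PySem.List.pyGetD l_v i 0) p.1.2.2)
                - (if p.1.2.1 = 0 then PySem.List.pyGetD l_v i 0 else min (PySem.List.pyGetD l_v i 0) p.1.2.1)
            then p.2 else 0)).sum) := by
  simp only [altStep]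
  rw [foldl_pair
    (fun p : (Int × Int × Int) × Int => (p.1.1 + PySem.List.pyGetD l_v i 0,
       if p.1.2.1 = 0 then PySem.List.pyGetD l_v i 0 else min (PySem.List.pyGetD l_v i 0) p.1.2.1,
       if p.1.2.1 = 0 then PySem.List.pyGetD l_v i 0 else max (PySem.List.pyGetD l_v i 0) p.1.2.2))
    (fun p => p.2)
    (fun p : (Int × Int × Int) × Int => l ≤ p.1.1 + PySem.List.pyGetD l_v i 0 ∧ p.1.1 + PySem.List.pyGetD l_v i 0 ≤ h_ ∧
       x ≤ (if p.1.2.1 = 0 then PySem.List.pyGetD l_v i 0 else max (PySem.List.pyGetD l_v i 0) p.1.2.2)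
         - (if p.1.2.1 = 0 then PySem.List.pyGetD l_v i 0 else min (PySem.List.pyGetD l_v i 0) p.1.2.1))]

lemma loopB (l_v : List Int) (l h_ x : Int) :
    ∀ (I : List Int) (d : PySem.Dict (Int × Int × Int) Int) (t : Int), d.keys.Nodup →
      (I.foldl (altStep l_v l h_ x) (d, t)).2
        = t + wsum (modelG l h_ x (I.map (fun i => PySem.List.pyGetD l_v i 0))) d := by
  intro I
  induction I with
  | nil =>
    intro d t hd
    simp [wsum, modelG]
  | cons i I ih =>
    intro d t hd
    simp only [List.foldl_cons, List.map_cons]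
    rw [altStep_eq]
    set v := PySem.List.pyGetD l_v i 0 with hv
    set es := I.map (fun j => PySem.List.pyGetD l_v j 0) with hes
    have hstates : ((d.items.foldl
          (fun dd (p : (Int × Int × Int) × Int) => dd.insert
            (p.1.1 + v, if p.1.2.1 = 0 then v else min v p.1.2.1, if p.1.2.1 = 0 then v else max v p.1.2.2)
            (dd.getD (p.1.1 + v, if p.1.2.1 = 0 then v else min v p.1.2.1, if p.1.2.1 = 0 then v else max v p.1.2.2) 0 + p.2))
          PySem.Dict.empty).items.foldl
          (fun dd (p : (Int × Int × Int) × Int) => dd.insert p.1 (dd.getD p.1 0 + p.2)) d).keys.Nodup :=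
      nodup_foldl_insert_key (fun p : (Int × Int × Int) × Int => p.1) (fun p => p.2) _ d hd
    rw [ih _ _ hstates]
    rw [wsum_foldl_insert_key (modelG l h_ x es) (fun p : (Int × Int × Int) × Int => p.1) (fun p => p.2) _ d hd]
    have hwnew : wsum (modelG l h_ x es)
        (d.items.foldl
          (fun dd (p : (Int × Int × Int) × Int) => dd.insert
            (p.1.1 + v, if p.1.2.1 = 0 then v else min v p.1.2.1, if p.1.2.1 = 0 then v else max v p.1.2.2)
            (dd.getD (p.1.1 + v, if p.1.2.1 = 0 then v else min v p.1.2.1, if p.1.2.1 = 0 then v else max v p.1.2.2) 0 + p.2))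
          PySem.Dict.empty)
        = (d.items.map (fun p => p.2 * modelG l h_ x es
            (p.1.1 + v, if p.1.2.1 = 0 then v else min v p.1.2.1, if p.1.2.1 = 0 then v else max v p.1.2.2))).sum := by
      rw [wsum_foldl_insert_key (modelG l h_ x es)
        (fun p : (Int × Int × Int) × Int => (p.1.1 + v, if p.1.2.1 = 0 then v else min v p.1.2.1, if p.1.2.1 = 0 then v else max v p.1.2.2))
        (fun p => p.2) d.items PySem.Dict.empty PySem.Dict.nodup_keys_empty]
      unfold wsum
      simp [show (PySem.Dict.empty : PySem.Dict (Int × Int × Int) Int).items = [] from rfl]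
    have hitems : ((d.items.foldl
          (fun dd (p : (Int × Int × Int) × Int) => dd.insert
            (p.1.1 + v, if p.1.2.1 = 0 then v else min v p.1.2.1, if p.1.2.1 = 0 then v else max v p.1.2.2)
            (dd.getD (p.1.1 + v, if p.1.2.1 = 0 then v else min v p.1.2.1, if p.1.2.1 = 0 then v else max v p.1.2.2) 0 + p.2))
          PySem.Dict.empty).items.map (fun p => p.2 * modelG l h_ x es p.1)).sum
        = (d.items.map (fun p => p.2 * modelG l h_ x es
            (p.1.1 + v, if p.1.2.1 = 0 then v else min v p.1.2.1, if p.1.2.1 = 0 then v else max v p.1.2.2))).sum := by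
      have := hwnew
      unfold wsum at this
      exact this
    rw [hitems]
    unfold wsum
    have hsplit : d.items.map (fun p => p.2 * modelG l h_ x (v :: es) p.1)
        = d.items.map (fun p =>
            (if l ≤ p.1.1 + v ∧ p.1.1 + v ≤ h_ ∧
                x ≤ (if p.1.2.1 = 0 then v else max v p.1.2.2) - (if p.1.2.1 = 0 then v else min v p.1.2.1)
              then p.2 else 0)
            + (p.2 * modelG l h_ x es p.1 + p.2 * modelG l h_ x es
                (p.1.1 + v, if p.1.2.1 = 0 then v else min v p.1.2.1, if p.1.2.1 = 0 then v else max v p.1.2.2))) := by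
      apply List.map_congr_left
      intro p _
      by_cases hc : l ≤ p.1.1 + v ∧ p.1.1 + v ≤ h_ ∧
          x ≤ (if p.1.2.1 = 0 then v else max v p.1.2.2) - (if p.1.2.1 = 0 then v else min v p.1.2.1)
      · simp only [modelG, if_pos hc]
        ring
      · simp only [modelG, if_neg hc]
        ring
    rw [hsplit, PySem.List.sum_map_add_int, PySem.List.sum_map_add_int]
    ring

lemma bfgo_eq (l_v : List Int) (l h_ x : Int) :
    ∀ (fuel : Nat) (c_v c_i l_p h_p : Int), c_i ≤ (l_v.length : Int) →
      ((l_v.length : Int) - c_i).toNat < fuel →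
      b_f_go l_v l h_ x fuel c_v c_i l_p h_p
        = modelG l h_ x ((PySem.List.pyRange c_i (l_v.length : Int) 1).map
            (fun i => PySem.List.pyGetD l_v i 0)) (c_v, l_p, h_p) := by
  intro fuel
  induction fuel with
  | zero => intro c_v c_i l_p h_p hle hf; omega
  | succ fuel ih =>
    intro c_v c_i l_p h_p hle hf
    by_cases he : c_i = (l_v.length : Int)
    · rw [he]
      simp [b_f_go, PySem.List.pyRange_one_eq_nil (le_refl ((l_v.length : Int))), modelG]
    · have hlt : c_i < (l_v.length : Int) := lt_of_le_of_ne hle he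
      rw [PySem.List.pyRange_one_cons hlt]
      simp only [List.map_cons]
      simp only [b_f_go, if_neg he]
      rw [ih c_v (c_i + 1) l_p h_p (by omega) (by omega),
          ih (c_v + PySem.List.pyGetD l_v c_i 0) (c_i + 1)
            (if l_p = 0 then PySem.List.pyGetD l_v c_i 0 else min (PySem.List.pyGetD l_v c_i 0) l_p)
            (if l_p = 0 then PySem.List.pyGetD l_v c_i 0 else max (PySem.List.pyGetD l_v c_i 0) h_p)
            (by omega) (by omega)]
      simp only [modelG]

theorem b_f_spec : Claim_equal_b_f := by
  intro l_v c_v c_i l h_ l_p h_p x _ hpre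
  unfold Spec_b_f b_f b_f_alt
  rw [bfgo_eq l_v l h_ x _ c_v c_i l_p h_p hpre.2 (by omega)]
  have hnd : (PySem.Dict.ofList [(((c_v, l_p, h_p) : Int × Int × Int), (1 : Int))]).keys.Nodup := by
    have : (PySem.Dict.ofList [(((c_v, l_p, h_p) : Int × Int × Int), (1 : Int))]).keys = [(c_v, l_p, h_p)] := rfl
    rw [this]; simp
  rw [loopB l_v l h_ x _ _ 0 hnd]
  have hitems : (PySem.Dict.ofList [(((c_v, l_p, h_p) : Int × Int × Int), (1 : Int))]).items
      = [((c_v, l_p, h_p), 1)] := rfl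
  unfold wsum
  rw [hitems]
  simp
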